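-- pv_equiv track=rewrite | github.com/r11922135/android_bootcamp_conversion_tool | scripts/03_generate_notes.py | _group_note_batches
-- ===== SOURCE A (Python) =====
-- def _group_note_batches(notes_text: str, max_chars: int) -> list[str]:
--     parts = [part.strip() for part in notes_text.split("\n\n---\n\n") if part.strip()]
--     if not parts:
--         return []
--
--     batches: list[str] = []
--     current_parts: list[str] = []
--     current_len = 0
--
--     for part in parts:
--         extra_len = len(part) if not current_parts else len(part) + len("\n\n---\n\n")
--         if current_parts and current_len + extra_len > max_chars:
--             batches.append("\n\n---\n\n".join(current_parts))
--             current_parts = [part]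
--             current_len = len(part)
--             continue
--
--         current_parts.append(part)
--         current_len += extra_len
--
--     if current_parts:
--         batches.append("\n\n---\n\n".join(current_parts))
--
--     return batches
-- ===== SOURCE B (Python) =====
-- SEP = "\n\n---\n\n"
--
--
-- def _take_batch(parts, max_chars):
--     """Longest prefix of parts that fits in max_chars (the first part is
--     always taken); returns (joined prefix, remaining parts)."""
--     total = len(parts[0])
--     k = 1
--     while k < len(parts) and total + len(SEP) + len(parts[k]) <= max_chars:
--         total += len(SEP) + len(parts[k])
--         k += 1
--     return SEP.join(parts[:k]), parts[k:]
--
--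
-- def _group_note_batches(notes_text: str, max_chars: int) -> list[str]:
--     parts = [part.strip() for part in notes_text.split(SEP) if part.strip()]
--     batches = []
--     while parts:
--         batch, parts = _take_batch(parts, max_chars)
--         batches.append(batch)
--     return batches
-- ===== Notes on version B (the rewrite author's own statement) =====
-- stated objective: alternative
-- what changed: B replaces A's single streaming pass with a list-of-parts accumulator and a running length counter by a staged decomposition: an outer loop that repeatedly extracts the longest fitting prefix of the remaining parts (a helper computing the batch's extent by index) and joins that slice in one step.
import Mathlib
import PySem

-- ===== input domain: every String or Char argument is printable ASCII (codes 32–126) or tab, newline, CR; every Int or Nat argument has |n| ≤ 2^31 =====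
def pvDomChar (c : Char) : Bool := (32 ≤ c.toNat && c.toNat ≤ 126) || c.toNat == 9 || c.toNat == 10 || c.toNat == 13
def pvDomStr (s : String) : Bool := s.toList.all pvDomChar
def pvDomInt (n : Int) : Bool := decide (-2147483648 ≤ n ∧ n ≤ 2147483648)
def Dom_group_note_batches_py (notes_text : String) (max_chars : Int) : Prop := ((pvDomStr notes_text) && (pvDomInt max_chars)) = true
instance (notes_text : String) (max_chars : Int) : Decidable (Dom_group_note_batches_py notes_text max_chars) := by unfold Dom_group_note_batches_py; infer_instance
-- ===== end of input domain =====

-- B regroups the parts by a staged decomposition (outer loop extracting the longest fitting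
-- prefix per batch, then joining it) instead of A's single streaming pass with a running counter.


-- the separator literal "\n\n---\n\n" shared by both Pythons
def pvSep : String := "\n\n---\n\n"

-- parts = [part.strip() for part in notes_text.split(SEP) if part.strip()]  (identical first line of A and B)
def pvParts (notes_text : String) : List String :=
  (((PySem.Chars.splitOn notes_text.toList pvSep.toList).map String.ofList).filter
    (fun p => PySem.Str.strip p != "")).map PySem.Str.strip

-- ===== PORT A =====
-- one loop iteration of A: state (batches, current_parts, current_len)
def pvStepA (max_chars : Int) (st : List String × List String × Int) (part : String) :
    List String × List String × Int :=
  let extra := if st.2.1 = [] then PySem.Str.len part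
               else PySem.Str.len part + PySem.Str.len pvSep
  if st.2.1 ≠ [] ∧ st.2.2 + extra > max_chars then
    (st.1 ++ [PySem.Str.join pvSep st.2.1], [part], PySem.Str.len part)
  else
    (st.1, st.2.1 ++ [part], st.2.2 + extra)

def group_note_batches_py (notes_text : String) (max_chars : Int) : List String :=
  let parts := pvParts notes_text
  if parts = [] then []
  else
    let st := parts.foldl (pvStepA max_chars) ([], [], 0)
    if st.2.1 ≠ [] then st.1 ++ [PySem.Str.join pvSep st.2.1] else st.1

-- ===== PORT B =====
-- inner while of B's _take_batch: extends the prefix while the next part still fits;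
-- returns (extension of the prefix, remaining parts) — parts[1:k], parts[k:]
def pvFitExt (max_chars : Int) (total : Int) : List String → List String × List String
  | [] => ([], [])
  | p :: ps =>
    if total + PySem.Str.len pvSep + PySem.Str.len p ≤ max_chars then
      let r := pvFitExt max_chars (total + PySem.Str.len pvSep + PySem.Str.len p) ps
      (p :: r.1, r.2)
    else ([], p :: ps)

lemma pvFitExt_snd_len (max_chars total : Int) (xs : List String) :
    (pvFitExt max_chars total xs).2.length ≤ xs.length := by
  induction xs generalizing total with
  | nil => simp [pvFitExt]
  | cons p ps ih =>
    simp only [pvFitExt]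
    split
    · exact le_trans (ih _) (Nat.le_succ _)
    · simp

-- outer while of B: extract one batch (first part always taken), join it, recurse on the rest
def pvChunks (max_chars : Int) : List String → List String
  | [] => []
  | p :: ps =>
    let r := pvFitExt max_chars (PySem.Str.len p) ps
    PySem.Str.join pvSep (p :: r.1) :: pvChunks max_chars r.2
termination_by xs => xs.length
decreasing_by
  simpa using Nat.lt_succ_of_le (pvFitExt_snd_len max_chars (PySem.Str.len p) ps)

def group_note_batches_py_alt (notes_text : String) (max_chars : Int) : List String :=
  pvChunks max_chars (pvParts notes_text)

-- ===== PRECONDITION & SPEC =====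
def Spec_group_note_batches_py (notes_text : String) (max_chars : Int) (out : List String) : Prop := out = group_note_batches_py_alt notes_text max_chars
instance (notes_text : String) (max_chars : Int) (out : List String) : Decidable (Spec_group_note_batches_py notes_text max_chars out) := by unfold Spec_group_note_batches_py; infer_instance

-- ===== CLAIM (what is proved, stated in full; the proofs are below) =====
def Claim_equal_group_note_batches_py : Prop := ∀ (notes_text : String) (max_chars : Int), Dom_group_note_batches_py notes_text max_chars → Spec_group_note_batches_py notes_text max_chars (group_note_batches_py notes_text max_chars)

-- ===== LEMMAS AND PROOFS =====

lemma pvJoin_singleton (p : String) : PySem.Str.join pvSep [p] = p := by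
  simp [PySem.Str.join, PySem.Chars.join_singleton]

lemma pvJoinChars_append (cur : List (List Char)) (h : cur ≠ []) (part : List Char) :
    PySem.Chars.join pvSep.toList (cur ++ [part])
      = PySem.Chars.join pvSep.toList cur ++ pvSep.toList ++ part := by
  induction cur with
  | nil => simp at h
  | cons q cur ih =>
    cases cur with
    | nil => simp [PySem.Chars.join_singleton, PySem.Chars.join_cons_cons]
    | cons r cur' =>
      simp only [List.cons_append, PySem.Chars.join_cons_cons] at *
      rw [ih (by simp)]
      simp

lemma pvLen_join_append (cur : List String) (h : cur ≠ []) (part : String) :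
    PySem.Str.len (PySem.Str.join pvSep (cur ++ [part]))
      = PySem.Str.len (PySem.Str.join pvSep cur) + PySem.Str.len pvSep + PySem.Str.len part := by
  have hm : List.map String.toList cur ≠ [] := by simpa using h
  simp only [PySem.Str.len_eq, PySem.Str.toList_join, List.map_append, List.map_cons, List.map_nil]
  rw [pvJoinChars_append _ hm part.toList]
  simp only [List.length_append]
  push_cast
  ring

-- A's finishing step
def pvFinishA (st : List String × List String × Int) : List String :=
  if st.2.1 ≠ [] then st.1 ++ [PySem.Str.join pvSep st.2.1] else st.1

-- main invariant: from a nonempty current batch, A's remaining fold produces exactly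
-- B's "fitting extension of the current batch, then chunks of the rest"
lemma pvLoop_eq (max_chars : Int) (rest : List String) :
    ∀ (batches cur : List String), cur ≠ [] →
      pvFinishA (rest.foldl (pvStepA max_chars)
          (batches, cur, PySem.Str.len (PySem.Str.join pvSep cur)))
      = batches ++
          (let r := pvFitExt max_chars (PySem.Str.len (PySem.Str.join pvSep cur)) rest;
           PySem.Str.join pvSep (cur ++ r.1) :: pvChunks max_chars r.2) := by
  induction rest with
  | nil => intro batches cur h; simp [pvFitExt, pvFinishA, h, pvChunks]
  | cons part rest ih =>
    intro batches cur h
    simp only [List.foldl_cons]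
    by_cases hc : PySem.Str.len (PySem.Str.join pvSep cur) + (PySem.Str.len part + PySem.Str.len pvSep) > max_chars
    · -- part overflows: A flushes and restarts, B closes the batch here
      have hA : pvStepA max_chars (batches, cur, PySem.Str.len (PySem.Str.join pvSep cur)) part
          = (batches ++ [PySem.Str.join pvSep cur], [part], PySem.Str.len part) := by
        simp [PySem.Str.len_eq, PySem.Str.toList_join] at hc
        simp [pvStepA, h]
        omega
      rw [hA]
      have := ih (batches ++ [PySem.Str.join pvSep cur]) [part] (by simp)
      rw [pvJoin_singleton] at this
      rw [this]
      simp only [pvFitExt]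
      rw [if_neg (by omega)]
      simp only [List.append_nil, List.append_assoc, List.singleton_append]
      congr 1
      rw [pvChunks]
  
    · -- part fits: A appends it to current_parts, B extends the prefix
      have hA : pvStepA max_chars (batches, cur, PySem.Str.len (PySem.Str.join pvSep cur)) part
          = (batches, cur ++ [part],
             PySem.Str.len (PySem.Str.join pvSep cur) + (PySem.Str.len part + PySem.Str.len pvSep)) := by
        simp only [pvStepA, h]
        rw [if_neg (by tauto)]
        simp
      have hlen : PySem.Str.len (PySem.Str.join pvSep cur) + (PySem.Str.len part + PySem.Str.len pvSep)
          = PySem.Str.len (PySem.Str.join pvSep (cur ++ [part])) := by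
        rw [pvLen_join_append cur h part]; ring
      rw [hA, hlen, ih batches (cur ++ [part]) (by simp)]
      simp only [pvFitExt]
      rw [if_pos (by omega)]
      have harg : PySem.Str.len (PySem.Str.join pvSep cur) + PySem.Str.len pvSep + PySem.Str.len part
          = PySem.Str.len (PySem.Str.join pvSep (cur ++ [part])) := by rw [← hlen]; ring
      rw [harg]
      simp [List.append_assoc]

-- ===== VERDICT (by name: the statement is the Claim_ definition above) =====
theorem group_note_batches_py_spec : Claim_equal_group_note_batches_py := by
  intro notes_text max_chars _
  unfold Spec_group_note_batches_py group_note_batches_py group_note_batches_py_alt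
  cases hp : pvParts notes_text with
  | nil => simp [pvChunks]
  | cons p rest =>
    simp only [List.foldl_cons, if_neg (by simp : ¬ (p :: rest = []))]
    have h0 : pvStepA max_chars ([], [], 0) p = ([], [p], PySem.Str.len p) := by
      simp [pvStepA]
    rw [h0]
    have := pvLoop_eq max_chars rest [] [p] (by simp)
    rw [pvJoin_singleton] at this
    simp only [pvFinishA] at this
    rw [this]
    simp only [List.nil_append, List.singleton_append]
    rw [pvChunks]
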